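-- pv_equiv track=rewrite | github.com/Yggdrasill0/Pytaris | distance_calc/TED_ZS.py | compute_keyroots
-- ===== SOURCE A (Python) =====
-- def compute_keyroots(l):
--     """Compute keyroots of the graphs"""
--
--     seen = set()
--     keyroots = []
--
--     for i in reversed(range(len(l))):
--         if l[i] not in seen:
--             keyroots.append(i)
--             seen.add(l[i])
--
--     return list(reversed(keyroots))
-- ===== SOURCE B (Python) =====
-- def compute_keyroots(l):
--     """Compute keyroots of the graphs"""
--
--     return [i for i, v in enumerate(l) if v not in l[i + 1:]]
-- ===== Notes on version B (the rewrite author's own statement) =====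
-- stated objective: simpler
-- what changed: replaces the reverse index scan with a seen-set, appends and a final reversal by a single forward comprehension that keeps each index whose value does not occur again in the tail slice
import Mathlib
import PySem

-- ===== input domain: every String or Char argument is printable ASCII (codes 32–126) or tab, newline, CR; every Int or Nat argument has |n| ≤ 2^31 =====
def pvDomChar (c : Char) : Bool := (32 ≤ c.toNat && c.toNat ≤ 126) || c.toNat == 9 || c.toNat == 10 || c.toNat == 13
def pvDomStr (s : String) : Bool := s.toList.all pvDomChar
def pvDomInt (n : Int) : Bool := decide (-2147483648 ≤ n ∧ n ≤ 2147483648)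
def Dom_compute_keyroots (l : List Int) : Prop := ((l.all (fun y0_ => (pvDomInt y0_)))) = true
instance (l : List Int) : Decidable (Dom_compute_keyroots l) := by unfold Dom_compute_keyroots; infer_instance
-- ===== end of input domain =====

-- B replaces A's reverse scan with a seen-set by a single forward comprehension testing the tail slice (simpler, not faster).

-- ===== PORT A =====
-- A: seen = set(); keyroots = []; for i in reversed(range(len(l))): if l[i] not in seen: append i, add l[i]; return reversed(keyroots)
-- l[i] ported with pyGetD: every i drawn from range(len(l)) is in range, so Python never raises here.
def compute_keyroots (l : List Int) : List Int :=
  let st := ((PySem.List.pyRange 0 (l.length : Int) 1).reverse).foldl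
    (fun (st : PySem.Set Int × List Int) i =>
      let v := PySem.List.pyGetD l i 0
      if PySem.Set.contains st.1 v then st
      else (PySem.Set.add st.1 v, st.2 ++ [i]))
    (PySem.Set.empty, [])
  st.2.reverse

-- ===== PORT B =====
-- B: [i for i, v in enumerate(l) if v not in l[i+1:]]
def compute_keyroots_alt (l : List Int) : List Int :=
  ((PySem.List.enumerate l 0).filter
    (fun iv => !((PySem.List.slice l (some (iv.1 + 1)) none).contains iv.2))).map (·.1)

-- ===== PRECONDITION & SPEC =====
def Spec_compute_keyroots (l : List Int) (out : List Int) : Prop := out = compute_keyroots_alt l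
instance (l : List Int) (out : List Int) : Decidable (Spec_compute_keyroots l out) := by unfold Spec_compute_keyroots; infer_instance

-- ===== CLAIM (what is proved, stated in full; the proofs are below) =====
def Claim_equal_compute_keyroots : Prop := ∀ (l : List Int), Dom_compute_keyroots l → Spec_compute_keyroots l (compute_keyroots l)

-- ===== LEMMAS AND PROOFS =====

-- "index i is a keyroot wrt bound n and already-seen set s": l[i] unseen and not repeated in l[i+1:n]
def pvPred (l : List Int) (s : PySem.Set Int) (n i : Nat) : Bool :=
  !decide (l[i]?.getD 0 ∈ s) && !decide (l[i]?.getD 0 ∈ (l.take n).drop (i + 1))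

-- reference recursion mirroring A's loop, peeling the highest index first
def pvGoA (l : List Int) (s : PySem.Set Int) : Nat → PySem.Set Int × List Int
  | 0 => (s, [])
  | n + 1 =>
    let v := l[n]?.getD 0
    if v ∈ s then pvGoA l s n
    else
      let r := pvGoA l (PySem.Set.add s v) n
      (r.1, (Int.ofNat n) :: r.2)

theorem pvGoA_spec (l : List Int) (n : Nat) : ∀ (s : PySem.Set Int) (a : List Int),
    ((PySem.List.pyRange 0 (n : Int) 1).reverse).foldl
      (fun (st : PySem.Set Int × List Int) i =>
        let v := PySem.List.pyGetD l i 0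
        if PySem.Set.contains st.1 v then st
        else (PySem.Set.add st.1 v, st.2 ++ [i]))
      (s, a)
    = ((pvGoA l s n).1, a ++ (pvGoA l s n).2) := by
  induction n with
  | zero => intro s a; simp [PySem.List.pyRange_one_eq_nil, pvGoA]
  | succ n ih =>
    intro s a
    have hsplit : PySem.List.pyRange 0 ((n + 1 : Nat) : Int) 1
        = PySem.List.pyRange 0 (n : Int) 1 ++ [(n : Int)] := by
      have := PySem.List.pyRange_one_succ_right (a := 0) (b := (n : Int)) (by positivity)
      push_cast
      simp_all
    rw [hsplit, List.reverse_append]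
    simp only [List.reverse_singleton, List.singleton_append, List.foldl_cons,
      PySem.List.pyGetD_natCast, List.getD_eq_getElem?_getD]
    rw [pvGoA]
    by_cases h : l[n]?.getD 0 ∈ s
    · rw [if_pos h]
      have hc : PySem.Set.contains s (l[n]?.getD 0) = true := (PySem.Set.contains_iff s _).mpr h
      simp only [hc, if_true, ih]
    · rw [if_neg h]
      have hc : PySem.Set.contains s (l[n]?.getD 0) = false := by
        simpa using fun hx => h ((PySem.Set.contains_iff s _).mp hx)
      simp only [hc, Bool.false_eq_true, if_false, ih]
      simp [Int.ofNat_eq_natCast]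

theorem pvGoA_eq_filter (l : List Int) (n : Nat) (hn : n ≤ l.length) : ∀ (s : PySem.Set Int),
    (pvGoA l s n).2 = (((List.range n).filter (pvPred l s n)).reverse).map Int.ofNat := by
  induction n with
  | zero => intro s; simp [pvGoA]
  | succ n ih =>
    intro s
    have hn' : n ≤ l.length := Nat.le_of_succ_le hn
    have htail : ((l.take (n + 1)).drop (n + 1)) = [] :=
      List.drop_eq_nil_of_le (by simp)
    have htake : l.take (n + 1) = l.take n ++ [l[n]?.getD 0] := by
      rw [List.take_add_one]
      congr 1
      rw [List.getElem?_eq_getElem (by omega : n < l.length)]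
      rfl
    have hdropapp : ∀ i : Nat, i < n →
        ((l.take (n + 1)).drop (i + 1)) = ((l.take n).drop (i + 1)) ++ [l[n]?.getD 0] := by
      intro i hi
      rw [htake, List.drop_append_of_le_length]
      simp [List.length_take]; omega
    rw [pvGoA]
    simp only [List.range_succ, List.filter_append, List.filter_singleton]
    by_cases h : l[n]?.getD 0 ∈ s
    · have hpn : pvPred l s (n + 1) n = false := by
        simp [pvPred, htail, h]
      rw [if_pos h, hpn]
      have hc : ∀ i ∈ List.range n, pvPred l s (n + 1) i = pvPred l s n i := by
        intro i hi
        have hi' : i < n := List.mem_range.mp hi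
        simp only [pvPred, hdropapp i hi', List.mem_append, List.mem_singleton]
        by_cases he : l[i]?.getD 0 = l[n]?.getD 0
        · by_cases hm : l[i]?.getD 0 ∈ s
          · simp [hm]
          · exact absurd (he ▸ h) hm
        · simp [he]
      rw [List.filter_congr hc, ih hn' s]
      simp
    · have hpn : pvPred l s (n + 1) n = true := by
        simp [pvPred, htail, h]
      rw [if_neg h, hpn]
      have hc : ∀ i ∈ List.range n,
          pvPred l s (n + 1) i = pvPred l (PySem.Set.add s (l[n]?.getD 0)) n i := by
        intro i hi
        have hi' : i < n := List.mem_range.mp hi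
        simp only [pvPred, hdropapp i hi', List.mem_append, List.mem_singleton,
          PySem.Set.mem_add]
        by_cases he : l[i]?.getD 0 = l[n]?.getD 0 <;>
          by_cases hm : l[i]?.getD 0 ∈ s <;>
            by_cases hd : l[i]?.getD 0 ∈ (l.take n).drop (i + 1) <;>
              simp [he, hm, hd]
      rw [List.filter_congr hc, ih hn' _]
      simp [Int.ofNat_eq_natCast]

theorem pvEnumerate_eq (l : List Int) :
    PySem.List.enumerate l 0 = (List.range l.length).map (fun k : Nat => ((k : Int), l[k]?.getD 0)) := by
  apply List.ext_getElem
  · simp [PySem.List.length_enumerate]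
  · intro k h1 h2
    have hk : k < l.length := by simpa [PySem.List.length_enumerate] using h1
    rw [PySem.List.getElem_enumerate]
    simp [hk]

theorem alt_eq_filter (l : List Int) :
    compute_keyroots_alt l
      = ((List.range l.length).filter (pvPred l PySem.Set.empty l.length)).map Int.ofNat := by
  rw [compute_keyroots_alt, pvEnumerate_eq, List.filter_map, List.map_map]
  have hpred : ∀ k ∈ List.range l.length,
      ((fun iv : Int × Int => !((PySem.List.slice l (some (iv.1 + 1)) none).contains iv.2)) ∘
        (fun k : Nat => ((k : Int), l[k]?.getD 0))) k
      = pvPred l PySem.Set.empty l.length k := by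
    intro k hk
    have hcast : ((k : Int) + 1) = ((k + 1 : Nat) : Int) := by push_cast; ring
    simp only [Function.comp, hcast, PySem.List.slice_from_natCast]
    simp [pvPred, PySem.Set.empty, List.take_length]
  rw [List.filter_congr hpred]
  rfl

-- ===== VERDICT (by name: the statement is the Claim_ definition above) =====
theorem compute_keyroots_spec : Claim_equal_compute_keyroots := by
  intro l _
  show compute_keyroots l = compute_keyroots_alt l
  rw [compute_keyroots, alt_eq_filter]
  simp only [pvGoA_spec l l.length PySem.Set.empty [], List.nil_append,
    pvGoA_eq_filter l l.length le_rfl PySem.Set.empty]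
  rw [List.map_reverse, List.reverse_reverse]
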